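-- pv_equiv track=rewrite | github.com/Harisumirandataseva-369/Box-Cricket-Auction-App | pages/auction.py | _get_current_team_turn
-- ===== SOURCE A (Python) =====
-- def _get_current_team_turn(teams: list, allocations: dict, player_dict: dict, auction_type: str) -> dict:
--     """
--     Round-robin: the team with the fewest players in the target category goes next.
--     Ties broken by original team order (index).
--     """
--     counts = {}
--     for t in teams:
--         tn = t["team_name"]
--         t_allocs = allocations.get(tn, [])
--         cat_count = 0
--         for p in t_allocs:
--             ccid_str = str(p.get("player_ccid", ""))
--             if ccid_str in player_dict:
--                 p_cat = str(player_dict[ccid_str].get("Player Category", "")).lower()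
--                 if auction_type == "Marquee Players" and "marquee" in p_cat:
--                     cat_count += 1
--                 elif auction_type == "Pavilion Players" and "pavilion" in p_cat:
--                     cat_count += 1
--         counts[tn] = cat_count
--
--     min_count = min(counts.values()) if counts else 0
--     for team in teams:
--         if counts[team["team_name"]] == min_count:
--             return team
--     return teams[0]
-- ===== SOURCE B (Python) =====
-- def _get_current_team_turn(teams: list, allocations: dict, player_dict: dict, auction_type: str) -> dict:
--     """Single fused pass: track the best (lowest-count) team so far; earliest team wins ties."""
--     def cat_count(team):
--         n = 0
--         for p in allocations.get(team["team_name"], []):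
--             rec = player_dict.get(str(p.get("player_ccid", "")))
--             if rec is None:
--                 continue
--             p_cat = str(rec.get("Player Category", "")).lower()
--             if auction_type == "Marquee Players" and "marquee" in p_cat:
--                 n += 1
--             elif auction_type == "Pavilion Players" and "pavilion" in p_cat:
--                 n += 1
--         return n
--
--     best = None
--     best_count = None
--     for team in teams:
--         c = cat_count(team)
--         if best_count is None or c < best_count:
--             best, best_count = team, c
--     if best is None:
--         return teams[0]
--     return best
-- ===== Notes on version B (the rewrite author's own statement) =====
-- stated objective: simpler
-- what changed: Replaces A's three-stage structure (build a name->count dict over all teams, take min of its values, rescan teams for the first name hitting the min) with one fused pass that keeps the running best (lowest-count, earliest) team, dropping the dict and the rescan.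
import Mathlib
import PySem

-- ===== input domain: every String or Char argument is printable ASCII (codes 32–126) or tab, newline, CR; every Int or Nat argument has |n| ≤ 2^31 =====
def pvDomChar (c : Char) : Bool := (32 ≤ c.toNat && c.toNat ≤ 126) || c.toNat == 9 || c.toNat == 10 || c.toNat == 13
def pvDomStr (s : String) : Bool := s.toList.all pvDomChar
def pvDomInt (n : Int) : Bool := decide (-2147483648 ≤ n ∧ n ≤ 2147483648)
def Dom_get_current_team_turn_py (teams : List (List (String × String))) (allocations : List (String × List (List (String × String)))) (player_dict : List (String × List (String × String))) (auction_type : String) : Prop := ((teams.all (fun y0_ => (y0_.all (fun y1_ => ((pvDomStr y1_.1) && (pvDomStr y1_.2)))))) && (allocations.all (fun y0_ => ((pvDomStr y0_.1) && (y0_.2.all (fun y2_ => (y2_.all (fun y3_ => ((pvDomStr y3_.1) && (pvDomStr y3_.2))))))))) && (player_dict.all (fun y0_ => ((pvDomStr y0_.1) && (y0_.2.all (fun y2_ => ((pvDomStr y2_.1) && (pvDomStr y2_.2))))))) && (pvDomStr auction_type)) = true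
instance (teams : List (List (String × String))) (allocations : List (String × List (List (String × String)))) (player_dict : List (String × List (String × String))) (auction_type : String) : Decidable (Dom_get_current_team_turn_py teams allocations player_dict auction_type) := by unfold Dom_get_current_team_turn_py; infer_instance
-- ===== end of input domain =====

-- B replaces A's count-dict + min + rescan with one fused pass keeping the best (lowest-count,
-- earliest) team; same return value on every input where A returns (objective: simpler).

-- ===== PORT A =====

-- t["team_name"]: Python raises KeyError when the key is absent; Pre_ guarantees presence, so the
-- default "" is never consulted on admitted inputs.
def pvTeamName (t : List (String × String)) : String :=
  (PySem.Dict.mk t).getD "team_name" ""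

-- the inner `for p in allocations.get(tn, []):` counting loop, shared verbatim by both Pythons
-- (str(...) on values of type str is the identity, so it is dropped)
def pvCatCount (allocations : List (String × List (List (String × String)))) (player_dict : List (String × List (String × String))) (auction_type : String) (tn : String) : Int :=
  ((PySem.Dict.mk allocations).getD tn []).foldl (fun cat_count p =>
    let ccid_str := (PySem.Dict.mk p).getD "player_ccid" ""
    match (PySem.Dict.mk player_dict).get? ccid_str with
    | some rec =>
      let p_cat := PySem.Str.lower ((PySem.Dict.mk rec).getD "Player Category" "")
      if auction_type == "Marquee Players" && PySem.Str.isIn "marquee" p_cat then cat_count + 1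
      else if auction_type == "Pavilion Players" && PySem.Str.isIn "pavilion" p_cat then cat_count + 1
      else cat_count
    | none => cat_count) 0

-- `for team in teams: if counts[team["team_name"]] == min_count: return team` / `return teams[0]`;
-- counts[tn] never misses (every team's name was inserted); the [] fallback replaces the final
-- `return teams[0]`, reached only when teams = [] where Python raises IndexError (outside Pre_).
def pvScanA (counts : PySem.Dict String Int) (min_count : Int) : List (List (String × String)) → List (String × String)
  | [] => []
  | team :: rest =>
    if counts.getD (pvTeamName team) 0 == min_count then team else pvScanA counts min_count rest

def get_current_team_turn_py (teams : List (List (String × String))) (allocations : List (String × List (List (String × String)))) (player_dict : List (String × List (String × String))) (auction_type : String) : List (String × String) :=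
  let counts := teams.foldl (fun d t =>
    d.insert (pvTeamName t) (pvCatCount allocations player_dict auction_type (pvTeamName t)))
    PySem.Dict.empty
  -- min(counts.values()) if counts else 0
  let min_count : Int := (PySem.List.min? counts.values (fun x => x)).getD 0
  pvScanA counts min_count teams

-- ===== PORT B =====

-- single pass: best = None; for team: c = cat_count(team); update when best is None or c < best_count.
-- the none fallback is Python's `return teams[0]` on empty teams (IndexError, outside Pre_).
def get_current_team_turn_py_alt (teams : List (List (String × String))) (allocations : List (String × List (List (String × String)))) (player_dict : List (String × List (String × String))) (auction_type : String) : List (String × String) :=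
  match teams.foldl (fun best team =>
      let c := pvCatCount allocations player_dict auction_type (pvTeamName team)
      match best with
      | none => some (team, c)
      | some (b, bc) => if c < bc then some (team, c) else some (b, bc)) none with
  | some (b, _) => b
  | none => []

-- ===== PRECONDITION & SPEC =====
-- Pre_ excludes exactly the inputs where the Python raises: empty teams (the final `return teams[0]`
-- is an IndexError) and a team without the "team_name" key (KeyError); B raises there too.
def Pre_get_current_team_turn_py (teams : List (List (String × String))) (allocations : List (String × List (List (String × String)))) (player_dict : List (String × List (String × String))) (auction_type : String) : Prop :=
  teams ≠ [] ∧ ∀ t ∈ teams, (PySem.Dict.mk t).contains "team_name" = true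
instance (teams : List (List (String × String))) (allocations : List (String × List (List (String × String)))) (player_dict : List (String × List (String × String))) (auction_type : String) : Decidable (Pre_get_current_team_turn_py teams allocations player_dict auction_type) := by unfold Pre_get_current_team_turn_py; infer_instance

def pvWitness_get_current_team_turn_py : (List (List (String × String))) × (List (String × List (List (String × String)))) × (List (String × List (String × String))) × String :=
  ([[("team_name", "A")], [("team_name", "B")]],
   [("A", [[("player_ccid", "7")]])],
   [("7", [("Player Category", "Marquee")])],
   "Marquee Players")

def Spec_get_current_team_turn_py (teams : List (List (String × String))) (allocations : List (String × List (List (String × String)))) (player_dict : List (String × List (String × String))) (auction_type : String) (out : List (String × String)) : Prop := out = get_current_team_turn_py_alt teams allocations player_dict auction_type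
instance (teams : List (List (String × String))) (allocations : List (String × List (List (String × String)))) (player_dict : List (String × List (String × String))) (auction_type : String) (out : List (String × String)) : Decidable (Spec_get_current_team_turn_py teams allocations player_dict auction_type out) := by unfold Spec_get_current_team_turn_py; infer_instance

-- ===== CLAIM (what is proved, stated in full; the proofs are below) =====
def Claim_equal_get_current_team_turn_py : Prop := ∀ (teams : List (List (String × String))) (allocations : List (String × List (List (String × String)))) (player_dict : List (String × List (String × String))) (auction_type : String), Dom_get_current_team_turn_py teams allocations player_dict auction_type → Pre_get_current_team_turn_py teams allocations player_dict auction_type → Spec_get_current_team_turn_py teams allocations player_dict auction_type (get_current_team_turn_py teams allocations player_dict auction_type)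

-- ===== LEMMAS AND PROOFS =====

-- reference selector used only by the proofs: the first team whose count equals M
def pvPick (f : List (String × String) → Int) (M : Int) : List (List (String × String)) → List (String × String)
  | [] => []
  | t :: rest => if f t = M then t else pvPick f M rest

-- the counts dict built by A maps a name to its count (values depend only on the key, so
-- duplicate team names are harmless: re-insertion overwrites with the same value)
theorem pv_countsD (key : List (String × String) → String) (g : String → Int) :
    ∀ (l : List (List (String × String))) (d : PySem.Dict String Int) (k : String),
      (l.foldl (fun d t => d.insert (key t) (g (key t))) d).getD k 0
        = if k ∈ l.map key then g k else d.getD k 0 := by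
  intro l
  induction l with
  | nil => intro d k; simp
  | cons t rest ih =>
    intro d k
    simp only [List.foldl_cons, ih, List.map_cons, List.mem_cons]
    by_cases hk : k ∈ rest.map key
    · simp [hk]
    · by_cases he : k = key t
      · simp [he]
      · simp [hk, he, PySem.Dict.getD_insert]

-- A's rescan is the reference selector once the dict lookups are replaced by the counts
theorem pv_scanA_eq_pick (counts : PySem.Dict String Int) (f : List (String × String) → Int)
    (M : Int) :
    ∀ (l : List (List (String × String))),
      (∀ t ∈ l, counts.getD (pvTeamName t) 0 = f t) →
      pvScanA counts M l = pvPick f M l := by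
  intro l h
  induction l with
  | nil => rfl
  | cons t rest ih =>
    have ht := h t (by simp)
    simp only [pvScanA, pvPick, ht]
    have ih' := ih (fun u hu => h u (by simp [hu]))
    by_cases hm : f t = M <;> simp [hm, ih']

-- B's fused fold, run from a seeded best, yields the seed when it already attains M and
-- otherwise the reference selector's choice; the final count is M
theorem pv_foldB (f : List (String × String) → Int) (M : Int) :
    ∀ (l : List (List (String × String))) (b : List (String × String)) (bc : Int),
      (∀ t ∈ l, M ≤ f t) → M ≤ bc → (bc ≠ M → ∃ t ∈ l, f t = M) →
      l.foldl (fun best team =>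
        let c := f team
        match best with
        | none => some (team, c)
        | some (b, bc) => if c < bc then some (team, c) else some (b, bc)) (some (b, bc))
      = some (if bc = M then b else pvPick f M l, M) := by
  intro l
  induction l with
  | nil =>
    intro b bc _ _ hex
    by_cases hbM : bc = M
    · simp [hbM]
    · obtain ⟨t, ht, _⟩ := hex hbM; exact absurd ht (by simp)
  | cons t rest ih =>
    intro b bc hle hbc hex
    simp only [List.foldl_cons]
    by_cases hbM : bc = M
    · have hnc : ¬ f t < bc := not_lt.2 (hbM ▸ hle t (by simp))
      have := ih b bc (fun u hu => hle u (by simp [hu])) hbc (fun h => absurd hbM h)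
      simp only [hnc]
      simpa [hbM] using this
    · by_cases hc : f t < bc
      · by_cases hfM : f t = M
        · have := ih t (f t) (fun u hu => hle u (by simp [hu])) (le_of_eq hfM.symm)
            (fun h => absurd hfM h)
          simp only [if_pos hc]
          simpa [hfM, hbM, pvPick] using this
        · obtain ⟨t', ht', hft'⟩ := hex hbM
          have ht'r : t' ∈ rest := by
            rcases List.mem_cons.1 ht' with h | h
            · exact absurd (h ▸ hft') hfM
            · exact h
          have := ih t (f t) (fun u hu => hle u (by simp [hu])) (hle t (by simp))
            (fun _ => ⟨t', ht'r, hft'⟩)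
          simp only [if_pos hc]
          simpa [hfM, hbM, pvPick] using this
      · have hfM : f t ≠ M := by
          intro h; exact hc (h ▸ lt_of_le_of_ne hbc (Ne.symm hbM))
        obtain ⟨t', ht', hft'⟩ := hex hbM
        have ht'r : t' ∈ rest := by
          rcases List.mem_cons.1 ht' with h | h
          · exact absurd (h ▸ hft') hfM
          · exact h
        have := ih b bc (fun u hu => hle u (by simp [hu])) hbc (fun _ => ⟨t', ht'r, hft'⟩)
        simp only [if_neg hc]
        simpa [hfM, hbM, pvPick] using this

-- ===== VERDICT (by name: the statement is the Claim_ definition above) =====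
theorem get_current_team_turn_py_spec : Claim_equal_get_current_team_turn_py := by
  intro teams allocations player_dict auction_type _ hpre
  obtain ⟨hne, _⟩ := hpre
  unfold Spec_get_current_team_turn_py get_current_team_turn_py get_current_team_turn_py_alt
  set g : String → Int := pvCatCount allocations player_dict auction_type with hg
  set f : List (String × String) → Int := fun t => g (pvTeamName t) with hf
  set counts := teams.foldl (fun d t => d.insert (pvTeamName t) (g (pvTeamName t)))
    PySem.Dict.empty with hcounts
  set M : Int := (PySem.List.min? counts.values (fun x => x)).getD 0 with hM
  -- counts lookups
  have hlook : ∀ t ∈ teams, counts.getD (pvTeamName t) 0 = f t := by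
    intro t ht
    rw [hcounts, pv_countsD pvTeamName g teams PySem.Dict.empty (pvTeamName t)]
    simp only [List.mem_map_of_mem ht, if_pos]
    rfl
  -- keys and values of counts
  have hkeysnd : counts.keys.Nodup := by
    rw [hcounts]
    exact PySem.Dict.nodup_keys_foldl_insert_key teams pvTeamName _ _ (by simp)
  have hkeys : counts.keys = PySem.Set.ofList (teams.map pvTeamName) := by
    rw [hcounts, PySem.Dict.keys_foldl_insert_key]
    simp [PySem.Set.ofList_eq_foldl, PySem.Set.update]
  have hvals : counts.values = counts.keys.map (fun k => counts.getD k 0) :=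
    PySem.Dict.values_eq_map_keys counts hkeysnd 0
  -- every team's count is a value of counts
  have hmemv : ∀ t ∈ teams, f t ∈ counts.values := by
    intro t ht
    rw [hvals, hkeys]
    have hk : pvTeamName t ∈ PySem.Set.ofList (teams.map pvTeamName) :=
      (PySem.Set.mem_ofList _ _).2 (List.mem_map_of_mem ht)
    have : counts.getD (pvTeamName t) 0 = f t := hlook t ht
    exact this ▸ List.mem_map_of_mem hk
  -- min? is some
  obtain ⟨t0, ht0⟩ : ∃ t, t ∈ teams := by
    cases teams with
    | nil => exact absurd rfl hne
    | cons a l => exact ⟨a, by simp⟩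
  obtain ⟨m, hm⟩ : ∃ m, PySem.List.min? counts.values (fun x => x) = some m := by
    cases hmin : PySem.List.min? counts.values (fun x => x) with
    | none =>
      have : counts.values = [] := (PySem.List.min?_eq_none_iff _ _).1 hmin
      exact absurd (this ▸ hmemv t0 ht0) (by simp)
    | some m => exact ⟨m, rfl⟩
  have hMm : M = m := by rw [hM, hm]; rfl
  -- (a) M is a lower bound on all counts
  have hlb : ∀ t ∈ teams, M ≤ f t := by
    intro t ht
    rw [hMm]
    exact PySem.List.min?_isMin hm (f t) (hmemv t ht)
  -- (b) M is attained by some team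
  have hat : ∃ t ∈ teams, f t = M := by
    have hmem : m ∈ counts.values := PySem.List.min?_mem hm
    rw [hvals] at hmem
    obtain ⟨k, hk, hkm⟩ := List.mem_map.1 hmem
    rw [hkeys, PySem.Set.mem_ofList] at hk
    obtain ⟨t, ht, htk⟩ := List.mem_map.1 hk
    refine ⟨t, ht, ?_⟩
    rw [hMm, ← hkm, ← htk]
    exact (hlook t ht).symm
  -- A's side equals pvPick f M teams
  have hA : pvScanA counts M teams = pvPick f M teams :=
    pv_scanA_eq_pick counts f M teams hlook
  -- B's side equals pvPick f M teams
  cases teams with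
  | nil => exact absurd rfl hne
  | cons t0 rest =>
    have hle : ∀ t ∈ rest, M ≤ f t := fun u hu => hlb u (by simp [hu])
    have hbc : M ≤ f t0 := hlb t0 (by simp)
    have hex : f t0 ≠ M → ∃ t ∈ rest, f t = M := by
      intro hne0
      obtain ⟨t', ht', hft'⟩ := hat
      rcases List.mem_cons.1 ht' with h | h
      · exact absurd (h ▸ hft') hne0
      · exact ⟨t', h, hft'⟩
    have hB := pv_foldB f M rest t0 (f t0) hle hbc hex
    simp only [List.foldl_cons]
    rw [hA]
    show pvPick f M (t0 :: rest) =
      (match (rest.foldl (fun best team =>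
        let c := f team
        match best with
        | none => some (team, c)
        | some (b, bc) => if c < bc then some (team, c) else some (b, bc))
        (some (t0, f t0)) : Option ((List (String × String)) × Int)) with
      | some (b, _) => b
      | none => [])
    rw [hB]
    by_cases h0 : f t0 = M <;> simp [pvPick, h0]
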